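-- pv_equiv track=rewrite | github.com/chiarapepp/Quantum-Machine-Learning-Project | src/architectures.py | mera_num_blocks
-- ===== SOURCE A (Python) =====
-- def mera_num_blocks(n_qubits: int, n_scales: int) -> int:
--     """
--     Return the number of generic two-qubit blocks in the MERA-style circuit.
--
--     Each scale applies:
--     - one layer on odd neighboring pairs
--     - one layer on even neighboring pairs
--     Then the active set is reduced by keeping every other wire.
--     """
--     if n_qubits < 2:
--         raise ValueError("MERA requires at least 2 qubits.")
--     if n_scales < 1:
--         raise ValueError("n_scales must be at least 1.")
--
--     blocks = 0
--     active = list(range(n_qubits))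
--
--     for _ in range(n_scales):
--         if len(active) < 2:
--             break
--
--         blocks += max(0, (len(active) - 1) // 2)
--         blocks += len(active) // 2
--         active = active[::2]
--
--     return blocks
-- ===== SOURCE B (Python) =====
-- def mera_num_blocks(n_qubits: int, n_scales: int) -> int:
--     # B: closed form via the identity sum_{k>=0} floor(x/2^k) = 2x - popcount(x).
--     # Per scale the active size s contributes s-1 = floor((n-1)/2^k) blocks with
--     # s_k = ceil(n/2^k), so the total is a truncated binary-digit sum: no loop
--     # over scales or qubits at all.
--     if n_qubits < 2:
--         raise ValueError("MERA requires at least 2 qubits.")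
--     if n_scales < 1:
--         raise ValueError("n_scales must be at least 1.")
--     x = n_qubits - 1
--     m = min(n_scales, x.bit_length())
--     q = x >> m
--     return (2 * x - bin(x).count("1")) - (2 * q - bin(q).count("1"))
-- ===== Notes on version B (the rewrite author's own statement) =====
-- stated objective: faster
-- what changed: B replaces A's scale loop over shrinking lists by a closed form: the total block count is a truncated binary-digit sum, (2x - popcount(x)) - (2q - popcount(q)) with x = n_qubits-1 and q = x >> min(n_scales, x.bit_length()), computed with no loop over scales or qubits.
import Mathlib
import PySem

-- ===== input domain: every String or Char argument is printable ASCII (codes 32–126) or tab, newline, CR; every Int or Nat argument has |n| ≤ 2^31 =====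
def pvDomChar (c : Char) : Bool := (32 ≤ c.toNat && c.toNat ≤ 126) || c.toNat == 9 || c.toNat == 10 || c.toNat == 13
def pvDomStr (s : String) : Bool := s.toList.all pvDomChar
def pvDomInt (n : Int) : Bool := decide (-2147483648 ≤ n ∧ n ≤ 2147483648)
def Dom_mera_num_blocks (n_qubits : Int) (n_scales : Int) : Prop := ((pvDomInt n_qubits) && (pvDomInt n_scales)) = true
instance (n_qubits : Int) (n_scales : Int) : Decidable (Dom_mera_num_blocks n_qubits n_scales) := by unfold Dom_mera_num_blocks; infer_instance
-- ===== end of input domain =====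

-- B computes the block count by a popcount closed form instead of A's loop over shrinking lists.

-- ===== PORT A =====
-- the `for _ in range(n_scales)` loop with its `break`: fuel = remaining scales
def meraLoopA (fuel : Nat) (blocks : Int) (active : List Int) : Int :=
  match fuel with
  | 0 => blocks
  | f + 1 =>
    if active.length < 2 then blocks
    else
      meraLoopA f
        (blocks + max 0 (PySem.Int.floordiv ((active.length : Int) - 1) 2)
                + PySem.Int.floordiv (active.length : Int) 2)
        ((PySem.List.slice? active none none 2).getD [])   -- active[::2] (step 2 > 0: never none)

def mera_num_blocks (n_qubits : Int) (n_scales : Int) : Int :=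
  if n_qubits < 2 then 0        -- Python raises ValueError here (outside Pre_)
  else if n_scales < 1 then 0   -- Python raises ValueError here (outside Pre_)
  else meraLoopA n_scales.toNat 0 (PySem.List.pyRange 0 n_qubits 1)

-- ===== PORT B =====
-- bin(x).count("1") on a nonnegative int: binary digit sum
def pvPop (x : Nat) : Nat :=
  match x with
  | 0 => 0
  | n + 1 => pvPop ((n + 1) / 2) + (n + 1) % 2
decreasing_by exact Nat.div_lt_self (Nat.succ_pos n) (by norm_num)

-- x.bit_length() on a nonnegative int
def pvBitLen (x : Nat) : Nat :=
  match x with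
  | 0 => 0
  | n + 1 => pvBitLen ((n + 1) / 2) + 1
decreasing_by exact Nat.div_lt_self (Nat.succ_pos n) (by norm_num)

def mera_num_blocks_alt (n_qubits : Int) (n_scales : Int) : Int :=
  if n_qubits < 2 then 0        -- Python raises ValueError here (outside Pre_)
  else if n_scales < 1 then 0   -- Python raises ValueError here (outside Pre_)
  else
    let x := (n_qubits - 1).toNat
    let m := min n_scales.toNat (pvBitLen x)
    let q := x >>> m
    (2 * (x : Int) - (pvPop x : Int)) - (2 * (q : Int) - (pvPop q : Int))

-- ===== PRECONDITION & SPEC =====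
-- Pre_ excludes exactly the inputs where A raises ValueError (n_qubits < 2 or n_scales < 1).
def Pre_mera_num_blocks (n_qubits : Int) (n_scales : Int) : Prop :=
  2 ≤ n_qubits ∧ 1 ≤ n_scales
instance (n_qubits : Int) (n_scales : Int) : Decidable (Pre_mera_num_blocks n_qubits n_scales) := by
  unfold Pre_mera_num_blocks; infer_instance

def pvWitness_mera_num_blocks : Int × Int := (8, 3)

def Spec_mera_num_blocks (n_qubits : Int) (n_scales : Int) (out : Int) : Prop := out = mera_num_blocks_alt n_qubits n_scales
instance (n_qubits : Int) (n_scales : Int) (out : Int) : Decidable (Spec_mera_num_blocks n_qubits n_scales out) := by unfold Spec_mera_num_blocks; infer_instance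

-- ===== CLAIM (what is proved, stated in full; the proofs are below) =====
def Claim_equal_mera_num_blocks : Prop := ∀ (n_qubits : Int) (n_scales : Int), Dom_mera_num_blocks n_qubits n_scales → Pre_mera_num_blocks n_qubits n_scales → Spec_mera_num_blocks n_qubits n_scales (mera_num_blocks n_qubits n_scales)

-- ===== LEMMAS AND PROOFS =====

-- proof-only bridge: A's loop seen through the active-set size alone
def meraSizeLoop (fuel : Nat) (blocks : Int) (size : Int) : Int :=
  match fuel with
  | 0 => blocks
  | f + 1 =>
    if size < 2 then blocks
    else meraSizeLoop f (blocks + (size - 1)) (PySem.Int.floordiv (size + 1) 2)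

-- B's closed form as a function of the initial size minus one
def pvClosed (x : Nat) (f : Nat) : Int :=
  let m := min f (pvBitLen x)
  let q := x >>> m
  (2 * (x : Int) - (pvPop x : Int)) - (2 * (q : Int) - (pvPop q : Int))

-- every f k on range c is some ⇒ filterMap keeps all c elements
theorem pvFilterMap_range_len {α : Type} (f : Nat → Option α) :
    ∀ c : Nat, (∀ k < c, (f k).isSome) → (List.filterMap f (List.range c)).length = c := by
  intro c
  induction c with
  | zero => simp
  | succ n ih =>
    intro h
    rw [List.range_succ, List.filterMap_append, List.length_append,
        ih (fun k hk => h k (by omega))]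
    rcases Option.isSome_iff_exists.mp (h n (by omega)) with ⟨a, ha⟩
    simp [ha]

theorem pvCountToNat (n : Nat) : ((((n : Int)) + 2 - 1) / 2).toNat = (n + 1) / 2 := by omega

-- active[::2] keeps ceil(len/2) elements
theorem pvLenSlice2 {α : Type} (xs : List α) :
    ((PySem.List.slice? xs none none 2).getD []).length = (xs.length + 1) / 2 := by
  simp only [PySem.List.slice?, PySem.List.sliceIndices]
  norm_num
  rcases Nat.eq_zero_or_pos xs.length with h | h
  · simp [h]
  · rw [if_pos (by exact_mod_cast h), pvCountToNat]
    rw [pvFilterMap_range_len _ _ ?_]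
    intro k hk
    have : (2 * (k : Int)).toNat < xs.length := by omega
    simp [this]

-- A's loop only sees the list through its length; the bridge loop tracks that length
theorem pvLoopA_size (fuel : Nat) :
    ∀ (blocks : Int) (active : List Int),
      meraLoopA fuel blocks active = meraSizeLoop fuel blocks (active.length : Int) := by
  induction fuel with
  | zero => intro blocks active; rfl
  | succ f ih =>
    intro blocks active
    by_cases h : active.length < 2
    · simp [meraLoopA, meraSizeLoop, h, show ((active.length : Int) < 2) by exact_mod_cast h]
    · have hA : ¬ active.length < 2 := h
      have hB : ¬ ((active.length : Int) < 2) := by exact_mod_cast hA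
      rw [meraLoopA, meraSizeLoop]
      simp only [if_neg hA, if_neg hB]
      rw [ih]
      have e1 : blocks + max 0 (PySem.Int.floordiv ((active.length : Int) - 1) 2)
                  + PySem.Int.floordiv (active.length : Int) 2
                = blocks + ((active.length : Int) - 1) := by
        rw [PySem.Int.floordiv_eq_ediv_of_pos (by omega),
            PySem.Int.floordiv_eq_ediv_of_pos (by omega)]
        omega
      have e2 : ((((PySem.List.slice? active none none 2).getD []).length : Int))
                = PySem.Int.floordiv ((active.length : Int) + 1) 2 := by
        rw [pvLenSlice2, PySem.Int.floordiv_eq_ediv_of_pos (by omega)]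
        omega
      rw [e1, e2]

theorem pvPop_succ (x : Nat) (hx : 1 ≤ x) : pvPop x = pvPop (x / 2) + x % 2 := by
  obtain ⟨n, rfl⟩ : ∃ n, x = n + 1 := ⟨x - 1, by omega⟩
  rw [pvPop]

theorem pvBitLen_succ (x : Nat) (hx : 1 ≤ x) : pvBitLen x = pvBitLen (x / 2) + 1 := by
  obtain ⟨n, rfl⟩ : ∃ n, x = n + 1 := ⟨x - 1, by omega⟩
  rw [pvBitLen]

-- the closed form satisfies the loop's recurrence
theorem pvClosed_step (x : Nat) (f : Nat) (hx : 1 ≤ x) :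
    pvClosed x (f + 1) = (x : Int) + pvClosed (x / 2) f := by
  unfold pvClosed
  have hL : pvBitLen x = pvBitLen (x / 2) + 1 := pvBitLen_succ x hx
  have hm : min (f + 1) (pvBitLen x) = min f (pvBitLen (x / 2)) + 1 := by
    rw [hL]; omega
  have hq : x >>> (min f (pvBitLen (x / 2)) + 1) = (x / 2) >>> (min f (pvBitLen (x / 2))) := by
    rw [Nat.add_comm, Nat.shiftRight_add, Nat.shiftRight_one]
  simp only [hm, hq]
  have hP : pvPop x = pvPop (x / 2) + x % 2 := pvPop_succ x hx
  have hdm : 2 * (x / 2) + x % 2 = x := by omega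
  push_cast [hP]
  omega

-- the bridge loop equals the closed form
theorem pvSizeLoop_closed (fuel : Nat) :
    ∀ (blocks : Int) (s : Nat),
      meraSizeLoop fuel blocks (s : Int) = blocks + pvClosed (s - 1) fuel := by
  induction fuel with
  | zero =>
    intro blocks s
    simp [meraSizeLoop, pvClosed]
  | succ f ih =>
    intro blocks s
    by_cases h : s < 2
    · have hx : s - 1 = 0 := by omega
      have : ((s : Int) < 2) := by exact_mod_cast h
      simp [meraSizeLoop, this, hx, pvClosed, pvPop, pvBitLen]
    · have hB : ¬ ((s : Int) < 2) := by exact_mod_cast h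
      rw [meraSizeLoop]
      simp only [if_neg hB]
      have hfd : PySem.Int.floordiv ((s : Int) + 1) 2 = (((s + 1) / 2 : Nat) : Int) := by
        rw [PySem.Int.floordiv_eq_ediv_of_pos (by omega)]
        omega
      rw [hfd, ih]
      have hx2 : (s + 1) / 2 - 1 = (s - 1) / 2 := by omega
      rw [hx2, pvClosed_step (s - 1) f (by omega)]
      have hc : ((s - 1 : Nat) : Int) = (s : Int) - 1 := by omega
      rw [hc]
      ring

-- ===== VERDICT (by name: the statement is the Claim_ definition above) =====
theorem mera_num_blocks_spec : Claim_equal_mera_num_blocks := by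
  intro n_qubits n_scales _ hpre
  obtain ⟨hq, hs⟩ := hpre
  unfold Spec_mera_num_blocks mera_num_blocks mera_num_blocks_alt
  rw [if_neg (by omega), if_neg (by omega), if_neg (by omega), if_neg (by omega)]
  rw [pvLoopA_size, PySem.List.length_pyRange_one, sub_zero, pvSizeLoop_closed]
  have hx : n_qubits.toNat - 1 = (n_qubits - 1).toNat := by omega
  rw [hx]
  simp [pvClosed]
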